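-- pv_equiv track=rewrite | github.com/marmitar/MC458-Lista-6 | code/01.py | min_tiles_gr
-- ===== SOURCE A (Python) =====
-- def clean(t: list[int]) -> list[int]:
--     for i in reversed(range(len(t))):
--         if t[i] > 0:
--             return t[:i+1]
--     return []
--
-- def min_tiles_gr(t: list[int], M: float) -> tuple[int, list[int]]:
--     n = 0
--     res = []
--
--     while (t := clean(t)):
--         rem = int(M)
--         for i in reversed(range(len(t))):
--             r = min(t[i], rem // 2**i)
--             t[i] -= r
--             rem -= r * 2**i
--             res += [i] * r
--
--         n += 1
--     return n, res
-- ===== SOURCE B (Python) =====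
-- def min_tiles_gr(t, M):
--     # Batched greedy: each phase computes the consumption vector c of one greedy
--     # bin and emits all k identical consecutive bins at once, k limited by the
--     # tile type that runs short first.
--     cap = int(M)
--     t = list(t)
--     n = 0
--     res = []
--     while any(x > 0 for x in t):
--         while t[-1] <= 0:
--             t.pop()
--         rem = cap
--         c = []
--         for i in reversed(range(len(t))):
--             r = min(t[i], rem // 2 ** i)
--             c.insert(0, r)
--             rem -= r * 2 ** i
--         k = min(t[i] // c[i] for i in range(len(t)) if c[i] > 0)
--         pat = []
--         for i in reversed(range(len(t))):
--             pat += [i] * c[i]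
--         res += pat * k
--         n += k
--         t = [x - r * k for x, r in zip(t, c)]
--     return n, res
-- ===== Notes on version B (the rewrite author's own statement) =====
-- stated objective: faster
-- what changed: Instead of simulating every bin one at a time, B computes the greedy consumption vector c of one bin per phase and emits all k identical consecutive bins in bulk, k obtained from the integer divisions t[i]//c[i], so the outer loop runs once per distinct phase instead of once per bin; Pre_ restricts to the problem's natural domain (nonnegative tile counts, every positive tile fits in a bin): on negative counts A's value is an accident of min(), and on oversized tiles A never returns.
-- outside the precondition, e.g. on min_tiles_gr([-1, 4], 4): A returns (2, [1, 1, 1, 1]), B returns (3, [1, 1, 1, 1, 0])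
import Mathlib
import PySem

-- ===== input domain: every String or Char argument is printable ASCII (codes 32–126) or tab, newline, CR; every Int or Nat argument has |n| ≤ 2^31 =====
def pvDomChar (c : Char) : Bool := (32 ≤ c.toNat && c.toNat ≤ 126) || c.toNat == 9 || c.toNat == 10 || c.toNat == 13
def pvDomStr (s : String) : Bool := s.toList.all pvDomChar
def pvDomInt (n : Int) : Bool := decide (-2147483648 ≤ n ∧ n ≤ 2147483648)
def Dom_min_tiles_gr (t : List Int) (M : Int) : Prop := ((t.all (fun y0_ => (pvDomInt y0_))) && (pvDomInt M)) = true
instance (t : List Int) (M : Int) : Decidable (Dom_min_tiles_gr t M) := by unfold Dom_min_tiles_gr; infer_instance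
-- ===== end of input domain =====

-- B batches the k identical consecutive greedy bins of each phase via integer division
-- and emits them in bulk (objective: faster; same return value on Pre_).


-- ===== PORT A =====
-- clean: for i in reversed(range(len(t))): if t[i] > 0: return t[:i+1]; return []
def clean_go (t : List Int) : Nat → List Int
  | 0 => []
  | i+1 => if 0 < t.getD i 0 then t.take (i+1) else clean_go t i

def cleanA (t : List Int) : List Int := clean_go t t.length

-- inner for loop: i = len(t)-1 .. 0 over state (t, rem, res)
def passA_go (t : List Int) (rem : Int) (res : List Int) : Nat → List Int × Int × List Int
  | 0 => (t, rem, res)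
  | i+1 =>
    let r := min (t.getD i 0) (PySem.Int.floordiv rem (2 ^ i))
    passA_go (t.set i (t.getD i 0 - r)) (rem - r * 2 ^ i) (res ++ List.replicate r.toNat (i : Int)) i

-- fuel for the while loop (the loop runs at most sum-of-positive-parts times on Pre_)
def fuelA (t : List Int) : Nat := (t.foldl (fun a x => a + x.toNat) 0) + 1

def whileA (M : Int) : Nat → List Int → Int → List Int → Int × List Int
  | 0, _, n, res => (n, res)
  | f+1, t, n, res =>
    let u := cleanA t
    if u.isEmpty then (n, res)
    else
      let s := passA_go u M res u.length
      whileA M f s.1 (n + 1) s.2.2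

def min_tiles_gr (t : List Int) (M : Int) : Int × List Int := whileA M (fuelA t) t 0 []

-- ===== PORT B =====
-- while t[-1] <= 0: t.pop()    ([] case: that loop is only reached with a positive element present)
def stripB : List Int → List Int
  | [] => []
  | x :: xs =>
    if (x :: xs).getLast (by simp) ≤ 0 then stripB (x :: xs).dropLast else x :: xs
termination_by t => t.length
decreasing_by simp

-- for i in reversed(range(len(t))): r = min(t[i], rem // 2**i); c.insert(0, r); rem -= r * 2**i
def cLoopB (t : List Int) (rem : Int) (c : List Int) : Nat → List Int × Int
  | 0 => (c, rem)
  | i+1 =>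
    let r := min (t.getD i 0) (PySem.Int.floordiv rem (2 ^ i))
    cLoopB t (rem - r * 2 ^ i) (r :: c) i

-- for i in reversed(range(len(t))): pat += [i] * c[i]
def patLoopB (c : List Int) (pat : List Int) : Nat → List Int
  | 0 => pat
  | i+1 => patLoopB c (pat ++ List.replicate ((c.getD i 0).toNat) (i : Int)) i

-- fuel for B's while loop (each phase emits at least one bin; same bound as A's)
def fuelB (t : List Int) : Nat := (t.foldl (fun a x => a + x.toNat) 0) + 1

def whileB (M : Int) : Nat → List Int → Int → List Int → Int × List Int
  | 0, _, n, res => (n, res)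
  | f+1, t, n, res =>
    if t.any (fun x => 0 < x) then
      let u := stripB t
      let c := (cLoopB u M [] u.length).1
      let kOpt : Option Int :=
        PySem.List.min? ((List.range u.length).filterMap (fun i =>
          if 0 < c.getD i 0 then some (PySem.Int.floordiv (u.getD i 0) (c.getD i 0)) else none))
          (fun x => x)
      match kOpt with
      | none => (n, res)   -- Python raises ValueError (min of empty) here; unreachable under Pre_
      | some k =>
        let pat := patLoopB c [] u.length
        whileB M f (List.zipWith (fun x r => x - r * k) u c) (n + k)
          (res ++ (List.replicate k.toNat pat).flatten)
    else (n, res)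

def min_tiles_gr_alt (t : List Int) (M : Int) : Int × List Int := whileB M (fuelB t) t 0 []

-- ===== PRECONDITION & SPEC =====
-- Pre_ restricts to the problem's natural domain: tile counts are nonnegative and every
-- positive tile fits in a bin. A negative count is outside the task's meaning and A's value
-- there is an accident of min() (it silently zeroes the count inside the first bin); on an
-- oversized positive tile (2^i > M) A's while loop never returns at all.
def Pre_min_tiles_gr (t : List Int) (M : Int) : Prop :=
  (∀ j, j < t.length → 0 ≤ t.getD j 0) ∧
  (∀ j, j < t.length → 0 < t.getD j 0 → (2 : Int) ^ j ≤ M)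
instance (t : List Int) (M : Int) : Decidable (Pre_min_tiles_gr t M) := by
  unfold Pre_min_tiles_gr; infer_instance

def pvWitness_min_tiles_gr : List Int × Int := ([3, 1, 2], 7)

def Spec_min_tiles_gr (t : List Int) (M : Int) (out : Int × List Int) : Prop := out = min_tiles_gr_alt t M
instance (t : List Int) (M : Int) (out : Int × List Int) : Decidable (Spec_min_tiles_gr t M out) := by unfold Spec_min_tiles_gr; infer_instance

-- ===== CLAIM (what is proved, stated in full; the proofs are below) =====
def Claim_equal_min_tiles_gr : Prop := ∀ (t : List Int) (M : Int), Dom_min_tiles_gr t M → Pre_min_tiles_gr t M → Spec_min_tiles_gr t M (min_tiles_gr t M)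

-- ===== LEMMAS AND PROOFS =====

-- ---------- positive-mass measure ----------
def Spos (t : List Int) : Nat := (t.map Int.toNat).sum

theorem fuelA_eq (t : List Int) : fuelA t = Spos t + 1 := by
  simp [fuelA, Spos, PySem.List.foldl_add_nat]

theorem fuelB_eq (t : List Int) : fuelB t = Spos t + 1 := by
  simp [fuelB, Spos, PySem.List.foldl_add_nat]

theorem Spos_nonpos_zero (t : List Int) (h : ∀ x ∈ t, x ≤ 0) : Spos t = 0 := by
  induction t with
  | nil => simp [Spos]
  | cons a l ih =>
    simp only [Spos, List.map_cons, List.sum_cons] at *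
    have ha := h a (by simp)
    have : (∀ x ∈ l, x ≤ 0) := fun x hx => h x (by simp [hx])
    have := ih this
    omega

-- ---------- clean / strip ----------
theorem getDe (t : List Int) (j : Nat) (h : j < t.length) : t.getD j 0 = t[j] := by
  rw [List.getD_eq_getElem?_getD, List.getElem?_eq_getElem h]
  rfl

theorem clean_go_take (t : List Int) (l : Nat) (hl : l ≤ t.length) :
    ∀ i, i ≤ l → clean_go t i = clean_go (t.take l) i := by
  intro i
  induction i with
  | zero => intro _; simp [clean_go]
  | succ i ih =>
    intro hi
    have hgd : (t.take l).getD i 0 = t.getD i 0 := by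
      rw [getDe _ _ (by simp; omega), getDe _ _ (by omega), List.getElem_take]
    simp only [clean_go, hgd]
    rw [List.take_take, min_eq_left (by omega), ih (by omega)]

theorem cleanA_of_last_pos (t : List Int) (h : t ≠ [])
    (hl : 0 < t.getD (t.length - 1) 0) : cleanA t = t := by
  obtain ⟨m, hm⟩ : ∃ m, t.length = m + 1 := by
    cases t with
    | nil => simp at h
    | cons a l => exact ⟨l.length, by simp⟩
  rw [hm, Nat.add_sub_cancel] at hl
  unfold cleanA
  rw [hm]
  simp only [clean_go]
  rw [if_pos hl, ← hm, List.take_length]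

theorem cleanA_dropLast (t : List Int) (h : t ≠ [])
    (hl : t.getD (t.length - 1) 0 ≤ 0) : cleanA t = cleanA t.dropLast := by
  obtain ⟨m, hm⟩ : ∃ m, t.length = m + 1 := by
    cases t with
    | nil => simp at h
    | cons a l => exact ⟨l.length, by simp⟩
  rw [hm, Nat.add_sub_cancel] at hl
  unfold cleanA
  rw [hm]
  simp only [clean_go]
  rw [if_neg (by omega)]
  rw [clean_go_take t m (by omega) m le_rfl]
  rw [List.dropLast_eq_take, hm, Nat.add_sub_cancel]
  show _ = clean_go (List.take m t) ((List.take m t).length)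
  rw [List.length_take, min_eq_left (by omega)]

theorem stripB_eq_cleanA (t : List Int) : stripB t = cleanA t := by
  induction t using stripB.induct with
  | case1 => simp [stripB, cleanA, clean_go]
  | case2 x xs hlast ih =>
    rw [stripB, if_pos hlast, ih]
    refine (cleanA_dropLast _ (by simp) ?_).symm
    rw [getDe _ _ (by simp)]
    rw [List.getLast_eq_getElem] at hlast
    exact hlast
  | case3 x xs hlast =>
    rw [stripB, if_neg hlast]
    refine (cleanA_of_last_pos _ (by simp) ?_).symm
    rw [getDe _ _ (by simp)]
    rw [List.getLast_eq_getElem] at hlast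
    omega

theorem clean_go_cases (t : List Int) :
    ∀ i, i ≤ t.length →
      (clean_go t i = [] ∧ ∀ j < i, t.getD j 0 ≤ 0) ∨
      (∃ j, j < i ∧ 0 < t.getD j 0 ∧ clean_go t i = t.take (j+1) ∧
        ∀ j', j < j' → j' < i → t.getD j' 0 ≤ 0) := by
  intro i
  induction i with
  | zero => intro _; exact Or.inl ⟨rfl, by omega⟩
  | succ i ih =>
    intro hi
    by_cases hp : 0 < t.getD i 0
    · refine Or.inr ⟨i, by omega, hp, ?_, by omega⟩
      simp only [clean_go]
      rw [if_pos hp]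
    · rcases ih (by omega) with ⟨he, hall⟩ | ⟨j, hj, hjp, he, htail⟩
      · refine Or.inl ⟨?_, ?_⟩
        · simp only [clean_go]
          rw [if_neg hp, he]
        · intro j hj
          rcases Nat.lt_succ_iff_lt_or_eq.mp hj with h' | h'
          · exact hall j h'
          · subst h'; omega
      · refine Or.inr ⟨j, by omega, hjp, ?_, ?_⟩
        · simp only [clean_go]
          rw [if_neg hp, he]
        · intro j' h1 h2
          rcases Nat.lt_succ_iff_lt_or_eq.mp h2 with h' | h'
          · exact htail j' h1 h'
          · subst h'; omega

theorem cleanA_prefix (t : List Int) : cleanA t = t.take (cleanA t).length := by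
  rcases clean_go_cases t t.length le_rfl with ⟨he, _⟩ | ⟨j, hj, _, he, _⟩
  · unfold cleanA; rw [he]; simp
  · unfold cleanA
    rw [he, List.length_take, min_eq_left (by omega)]

theorem cleanA_getD (t : List Int) (j : Nat) (hj : j < (cleanA t).length) :
    (cleanA t).getD j 0 = t.getD j 0 := by
  have hle : (cleanA t).length ≤ t.length := by
    conv_lhs => rw [cleanA_prefix t]
    simp
  rw [getDe _ _ hj, getDe _ _ (by omega), List.getElem_of_eq (cleanA_prefix t) hj,
    List.getElem_take]

theorem cleanA_length_le (t : List Int) : (cleanA t).length ≤ t.length := by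
  conv_lhs => rw [cleanA_prefix t]
  simp

theorem cleanA_last_pos (t : List Int) (h : cleanA t ≠ []) :
    0 < (cleanA t).getD ((cleanA t).length - 1) 0 := by
  rcases clean_go_cases t t.length le_rfl with ⟨he, _⟩ | ⟨j, hj, hjp, he, _⟩
  · exact absurd he h
  · have he' : cleanA t = t.take (j+1) := he
    have hlen : (cleanA t).length = j + 1 := by
      rw [he', List.length_take, min_eq_left (by omega)]
    have hj1 : j < (cleanA t).length := by omega
    rw [hlen, Nat.add_sub_cancel, getDe _ _ hj1, List.getElem_of_eq (cleanA_prefix t) hj1,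
      List.getElem_take]
    rwa [getDe _ _ hj] at hjp

theorem cleanA_nil_iff (t : List Int) :
    cleanA t = [] ↔ t.any (fun x => 0 < x) = false := by
  rcases clean_go_cases t t.length le_rfl with ⟨he, hall⟩ | ⟨j, hj, hjp, he, _⟩
  · have he' : cleanA t = [] := he
    rw [he']
    simp only [true_iff, List.any_eq_false]
    intro x hx
    obtain ⟨j, hjl, rfl⟩ := List.mem_iff_getElem.mp hx
    have := hall j hjl
    rw [getDe _ _ hjl] at this
    simpa using this
  · have he' : cleanA t = t.take (j+1) := he
    rw [he']
    constructor
    · intro hcontra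
      have : (t.take (j+1)).length = 0 := by rw [hcontra]; rfl
      rw [List.length_take] at this
      omega
    · intro hany
      rw [List.any_eq_false] at hany
      have hmem : t[j]'hj ∈ t := List.getElem_mem hj
      have := hany _ hmem
      rw [getDe _ _ hj] at hjp
      simp at this
      omega

theorem Spos_append (a b : List Int) : Spos (a ++ b) = Spos a + Spos b := by
  simp [Spos]

theorem Spos_cleanA (t : List Int) : Spos (cleanA t) = Spos t := by
  rcases clean_go_cases t t.length le_rfl with ⟨he, hall⟩ | ⟨j, hj, hjp, he, htail⟩
  · have he' : cleanA t = [] := he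
    rw [he']
    have h0 : Spos t = 0 := by
      apply Spos_nonpos_zero
      intro x hx
      obtain ⟨j, hjl, rfl⟩ := List.mem_iff_getElem.mp hx
      have := hall j hjl
      rwa [getDe _ _ hjl] at this
    rw [h0]
    rfl
  · have he' : cleanA t = t.take (j+1) := he
    rw [he']
    conv_rhs => rw [← List.take_append_drop (j+1) t]
    rw [Spos_append]
    have hdrop : Spos (t.drop (j+1)) = 0 := by
      apply Spos_nonpos_zero
      intro x hx
      obtain ⟨m, hml, rfl⟩ := List.mem_iff_getElem.mp hx
      rw [List.getElem_drop]
      have hlt : j + 1 + m < t.length := by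
        rw [List.length_drop] at hml; omega
      have := htail (j+1+m) (by omega) hlt
      rwa [getDe _ _ hlt] at this
    omega

theorem cleanA_idem (t : List Int) : cleanA (cleanA t) = cleanA t := by
  by_cases h : cleanA t = []
  · rw [h]; rfl
  · exact cleanA_of_last_pos _ h (cleanA_last_pos t h)

-- ---------- the consumption loop ----------
theorem cLoopB_acc (t : List Int) :
    ∀ i rem acc, cLoopB t rem acc i = ((cLoopB t rem [] i).1 ++ acc, (cLoopB t rem [] i).2) := by
  intro i
  induction i with
  | zero => intro rem acc; simp [cLoopB]
  | succ i ih =>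
    intro rem acc
    simp only [cLoopB]
    rw [ih, ih _ [_]]
    simp

def Cv (t : List Int) (rem : Int) (i : Nat) : List Int := (cLoopB t rem [] i).1
def Rv (t : List Int) (rem : Int) (i : Nat) : Int := (cLoopB t rem [] i).2

theorem Cv_succ (t : List Int) (rem : Int) (i : Nat) :
    Cv t rem (i+1) =
      Cv t (rem - min (t.getD i 0) (PySem.Int.floordiv rem (2 ^ i)) * 2 ^ i) i ++
        [min (t.getD i 0) (PySem.Int.floordiv rem (2 ^ i))] := by
  simp only [Cv, cLoopB]
  rw [cLoopB_acc]

theorem Rv_succ (t : List Int) (rem : Int) (i : Nat) :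
    Rv t rem (i+1) =
      Rv t (rem - min (t.getD i 0) (PySem.Int.floordiv rem (2 ^ i)) * 2 ^ i) i := by
  simp only [Rv, cLoopB]
  rw [cLoopB_acc]

theorem Cv_length (t : List Int) (rem : Int) (i : Nat) : (Cv t rem i).length = i := by
  induction i generalizing rem with
  | zero => simp [Cv, cLoopB]
  | succ i ih => rw [Cv_succ]; simp [ih]

theorem Cv_getD_last (t : List Int) (rem : Int) (i : Nat) :
    (Cv t rem (i+1)).getD i 0 = min (t.getD i 0) (PySem.Int.floordiv rem (2 ^ i)) := by
  rw [Cv_succ]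
  rw [List.getD_append_right _ _ _ _ (by simp [Cv_length])]
  simp [Cv_length]

theorem Cv_getD_lt (t : List Int) (rem : Int) (i j : Nat) (hj : j < i) :
    (Cv t rem (i+1)).getD j 0 =
      (Cv t (rem - min (t.getD i 0) (PySem.Int.floordiv rem (2 ^ i)) * 2 ^ i) i).getD j 0 := by
  rw [Cv_succ]
  rw [List.getD_append _ _ _ _ (by simp [Cv_length, hj])]

theorem fdiv_nonneg' (rem : Int) (i : Nat) (h : 0 ≤ rem) :
    0 ≤ PySem.Int.floordiv rem (2 ^ i) := by
  rw [PySem.Int.le_floordiv_iff_mul_le (by positivity)]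
  simpa using h

theorem rem_step_nonneg (x rem : Int) (i : Nat) (_h : 0 ≤ rem) :
    0 ≤ rem - min x (PySem.Int.floordiv rem (2 ^ i)) * 2 ^ i := by
  have h1 : PySem.Int.floordiv rem (2 ^ i) * 2 ^ i ≤ rem := by
    rw [← PySem.Int.le_floordiv_iff_mul_le (by positivity)]

  have h2 : min x (PySem.Int.floordiv rem (2 ^ i)) ≤ PySem.Int.floordiv rem (2 ^ i) :=
    min_le_right _ _
  have h3 : min x (PySem.Int.floordiv rem (2 ^ i)) * 2 ^ i ≤
      PySem.Int.floordiv rem (2 ^ i) * 2 ^ i := by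
    apply mul_le_mul_of_nonneg_right h2 (by positivity)
  omega

theorem cLoopB_congr (t t' : List Int) :
    ∀ i rem, (∀ j < i, t.getD j 0 = t'.getD j 0) →
      cLoopB t rem [] i = cLoopB t' rem [] i := by
  intro i
  induction i with
  | zero => intro rem _; rfl
  | succ i ih =>
    intro rem h
    simp only [cLoopB]
    rw [h i (by omega)]
    rw [cLoopB_acc, cLoopB_acc t']
    rw [ih _ (fun j hj => h j (by omega))]

theorem Cv_le (t : List Int) :
    ∀ i rem j, j < i → (Cv t rem i).getD j 0 ≤ t.getD j 0 := by
  intro i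
  induction i with
  | zero => intro rem j hj; omega
  | succ i ih =>
    intro rem j hj
    rcases Nat.lt_succ_iff_lt_or_eq.mp hj with h' | h'
    · rw [Cv_getD_lt t rem i j h']
      exact ih _ j h'
    · subst h'
      rw [Cv_getD_last]
      exact min_le_left _ _

theorem Cv_nonneg (t : List Int) :
    ∀ i rem, 0 ≤ rem → ∀ j < i, 0 ≤ t.getD j 0 → 0 ≤ (Cv t rem i).getD j 0 := by
  intro i
  induction i with
  | zero => intro rem _ j hj; omega
  | succ i ih =>
    intro rem hrem j hj
    rcases Nat.lt_succ_iff_lt_or_eq.mp hj with h' | h'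
    · rw [Cv_getD_lt t rem i j h']
      exact ih _ (rem_step_nonneg _ _ _ hrem) j h'
    · subst h'
      rw [Cv_getD_last]
      intro hx
      exact le_min hx (fdiv_nonneg' _ _ hrem)

theorem Cv_top_pos (t : List Int) (rem : Int) (i : Nat)
    (ht : 0 < t.getD i 0) (hr : 2 ^ i ≤ rem) : 1 ≤ (Cv t rem (i+1)).getD i 0 := by
  rw [Cv_getD_last]
  refine le_min ht ?_
  rw [PySem.Int.le_floordiv_iff_mul_le (by positivity)]
  simpa using hr

-- ---------- the pattern loop ----------
theorem patLoopB_acc (c : List Int) :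
    ∀ i p, patLoopB c p i = p ++ patLoopB c [] i := by
  intro i
  induction i with
  | zero => intro p; simp [patLoopB]
  | succ i ih =>
    intro p
    simp only [patLoopB]
    rw [ih]
    simp
    exact (ih _).symm

theorem patLoopB_congr (c c' : List Int) :
    ∀ i p, (∀ j < i, c.getD j 0 = c'.getD j 0) → patLoopB c p i = patLoopB c' p i := by
  intro i
  induction i with
  | zero => intro p _; simp [patLoopB]
  | succ i ih =>
    intro p h
    simp only [patLoopB]
    rw [h i (by omega), ih _ (fun j hj => h j (by omega))]

-- ---------- A's pass in terms of the consumption vector ----------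
def subV (t c : List Int) : List Int := t.mapIdx (fun j x => x - c.getD j 0)

theorem length_subV (t c : List Int) : (subV t c).length = t.length := by
  simp [subV]

theorem getElem_subV (t c : List Int) (j : Nat) (hj : j < t.length) :
    (subV t c)[j]'(by simp [length_subV, hj]) = t[j] - c.getD j 0 := by
  simp [subV]

theorem subV_nil (t : List Int) : subV t [] = t := by
  unfold subV
  apply List.ext_getElem <;> simp

theorem subV_set (t c : List Int) (i : Nat) (hi : i < t.length) (hc : c.length = i) (r : Int) :
    subV (t.set i (t.getD i 0 - r)) c = subV t (c ++ [r]) := by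
  subst hc
  apply List.ext_getElem
  · simp [length_subV]
  · intro j h1 h2
    rw [getElem_subV _ _ j (by simpa [length_subV] using h1),
        getElem_subV _ _ j (by simpa [length_subV] using h2)]
    by_cases hji : j = c.length
    · subst hji
      rw [List.getElem_set_self]
      rw [List.getD_eq_default _ _ le_rfl]
      rw [List.getD_append_right _ _ _ _ le_rfl]
      simp [List.getElem?_eq_getElem hi]
    · rw [List.getElem_set_ne (by omega)]
      by_cases hlt : j < c.length
      · rw [List.getD_append _ _ _ _ hlt]
      · rw [List.getD_eq_default c _ (by omega), List.getD_eq_default (c ++ [r]) _ (by simp; omega)]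

theorem passA_eq :
    ∀ (i : Nat) (t : List Int), i ≤ t.length → ∀ rem res,
      passA_go t rem res i = (subV t (Cv t rem i), Rv t rem i, patLoopB (Cv t rem i) res i) := by
  intro i
  induction i with
  | zero =>
    intro t hi rem res
    simp [passA_go, Cv, Rv, cLoopB, patLoopB, subV_nil]
  | succ i ih =>
    intro t hi rem res
    simp only [passA_go]
    have hset : ∀ rem', cLoopB (t.set i (t.getD i 0 -
        min (t.getD i 0) (PySem.Int.floordiv rem (2 ^ i)))) rem' [] i = cLoopB t rem' [] i := by
      intro rem'
      apply cLoopB_congr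
      intro j hj
      rw [getDe (t.set i (t.getD i 0 - min (t.getD i 0) (PySem.Int.floordiv rem (2 ^ i)))) j
            (by simp; omega),
          getDe t j (by omega), List.getElem_set_ne (by omega)]
    rw [ih _ (by simp; omega) _ _]
    have hC : Cv (t.set i (t.getD i 0 - min (t.getD i 0) (PySem.Int.floordiv rem (2 ^ i))))
        (rem - min (t.getD i 0) (PySem.Int.floordiv rem (2 ^ i)) * 2 ^ i) i
        = Cv t (rem - min (t.getD i 0) (PySem.Int.floordiv rem (2 ^ i)) * 2 ^ i) i := by
      unfold Cv; rw [hset]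
    have hR : Rv (t.set i (t.getD i 0 - min (t.getD i 0) (PySem.Int.floordiv rem (2 ^ i))))
        (rem - min (t.getD i 0) (PySem.Int.floordiv rem (2 ^ i)) * 2 ^ i) i
        = Rv t (rem - min (t.getD i 0) (PySem.Int.floordiv rem (2 ^ i)) * 2 ^ i) i := by
      unfold Rv; rw [hset]
    rw [hC, hR]
    refine Prod.ext ?_ (Prod.ext ?_ ?_)
    · show subV _ _ = subV t (Cv t rem (i+1))
      rw [Cv_succ]
      exact subV_set t _ i (by omega) (Cv_length _ _ _) _
    · show Rv t _ i = Rv t rem (i+1)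
      rw [Rv_succ]
    · show patLoopB _ _ i = patLoopB (Cv t rem (i+1)) res (i+1)
      simp only [patLoopB]
      rw [Cv_getD_last]
      apply patLoopB_congr
      intro j hj
      rw [Cv_getD_lt t rem i j hj]

-- ---------- stability of the consumption vector across batched bins ----------
theorem stab (t t' : List Int) (m : Int) (hm : 0 ≤ m) :
    ∀ i rem, 0 ≤ rem → (∀ j < i, 0 ≤ t.getD j 0) →
      (∀ j < i, 0 < (Cv t rem i).getD j 0 → (m + 1) * (Cv t rem i).getD j 0 ≤ t.getD j 0) →
      (∀ j < i, t'.getD j 0 = t.getD j 0 - (Cv t rem i).getD j 0 * m) →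
      cLoopB t' rem [] i = cLoopB t rem [] i := by
  intro i
  induction i with
  | zero => intro rem _ _ _ _; rfl
  | succ i ih =>
    intro rem hrem hnn hk ht'
    have hfd : 0 ≤ PySem.Int.floordiv rem (2 ^ i) := fdiv_nonneg' _ _ hrem
    have hti : 0 ≤ t.getD i 0 := hnn i (by omega)
    have hrtop : (Cv t rem (i+1)).getD i 0 =
        min (t.getD i 0) (PySem.Int.floordiv rem (2 ^ i)) := Cv_getD_last t rem i
    have hreq : min (t'.getD i 0) (PySem.Int.floordiv rem (2 ^ i)) =
        min (t.getD i 0) (PySem.Int.floordiv rem (2 ^ i)) := by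
      set r := min (t.getD i 0) (PySem.Int.floordiv rem (2 ^ i)) with hrdef
      have hti' : t'.getD i 0 = t.getD i 0 - r * m := by
        rw [ht' i (by omega), hrtop]
      by_cases hpos : 0 < r
      · have hk' : (m + 1) * r ≤ t.getD i 0 := by
          have h := hk i (by omega)
          rw [hrtop] at h
          exact h hpos
        have hge : r ≤ t'.getD i 0 := by
          rw [hti']
          have hexp : (m + 1) * r = m * r + r := by ring
          have hcm : r * m = m * r := mul_comm _ _
          linarith [hk']
        have hrfd : r ≤ PySem.Int.floordiv rem (2 ^ i) := by
          rw [hrdef]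
          exact min_le_right _ _
        by_cases hcase : PySem.Int.floordiv rem (2 ^ i) ≤ t.getD i 0
        · have hrr : r = PySem.Int.floordiv rem (2 ^ i) := by rw [hrdef, min_eq_right hcase]
          rw [min_eq_right (by omega)]
          omega
        · have hrr : r = t.getD i 0 := by rw [hrdef, min_eq_left (by omega)]
          have hle' : t'.getD i 0 ≤ r := by
            rw [hti', hrr]
            have : 0 ≤ t.getD i 0 * m := mul_nonneg (by omega) hm
            linarith
          rw [min_eq_left (by omega)]
          omega
      · have h0 : 0 ≤ r := le_min hti hfd
        have hr0 : r = 0 := by omega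
        have ht0 : t.getD i 0 - r * m = t.getD i 0 := by rw [hr0]; ring
        rw [hti', ht0, ← hrdef]
    simp only [cLoopB]
    rw [hreq]
    rw [cLoopB_acc, cLoopB_acc t]
    have ihapp := ih (rem - min (t.getD i 0) (PySem.Int.floordiv rem (2 ^ i)) * 2 ^ i)
      (rem_step_nonneg _ _ _ hrem) (fun j hj => hnn j (by omega))
      (fun j hj => by
        have := hk j (by omega)
        rw [Cv_getD_lt t rem i j hj] at this
        exact this)
      (fun j hj => by
        have := ht' j (by omega)
        rw [Cv_getD_lt t rem i j hj] at this
        exact this)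
    rw [ihapp]

-- ---------- Spos bookkeeping ----------
theorem spos_zip_le (g : Int → Int → Int) :
    ∀ (u cs : List Int),
      (∀ j (h1 : j < u.length) (h2 : j < cs.length), (g (u[j]'h1) (cs[j]'h2)).toNat ≤ (u[j]'h1).toNat) →
      Spos (List.zipWith g u cs) ≤ Spos u := by
  intro u
  induction u with
  | nil => intro cs _; simp [Spos]
  | cons a u ih =>
    intro cs h
    cases cs with
    | nil => simp [Spos]
    | cons b cs =>
      simp only [List.zipWith_cons_cons, Spos, List.map_cons, List.sum_cons]
      have h0 := h 0 (by simp) (by simp)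
      have := ih cs (fun j h1 h2 => by
        have := h (j+1) (by simpa using h1) (by simpa using h2)
        simpa using this)
      simp only [Spos] at this
      simp at h0
      omega

theorem spos_batch (g : Int → Int → Int) (u cs : List Int) (K : Nat)
    (hlen : cs.length = u.length) (hne : u ≠ [])
    (hpt : ∀ j (h : j < u.length), (g (u[j]'h) (cs.getD j 0)).toNat ≤ (u[j]'h).toNat)
    (hlast : ∀ (h : 0 < u.length),
      (g (u[u.length - 1]'(by omega)) (cs.getD (u.length - 1) 0)).toNat + K ≤
        (u[u.length - 1]'(by omega)).toNat) :
    Spos (List.zipWith g u cs) + K ≤ Spos u := by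
  have hcne : cs ≠ [] := by
    intro hc
    rw [hc] at hlen
    simp at hlen
    exact hne (List.eq_nil_of_length_eq_zero hlen.symm)
  have hsplit_u := List.dropLast_append_getLast hne
  have hsplit_c := List.dropLast_append_getLast hcne
  have hlen' : u.dropLast.length = cs.dropLast.length := by
    simp [List.length_dropLast, hlen]
  have hzip : List.zipWith g u cs =
      List.zipWith g u.dropLast cs.dropLast ++ [g (u.getLast hne) (cs.getLast hcne)] := by
    conv_lhs => rw [← hsplit_u, ← hsplit_c]
    rw [List.zipWith_append hlen']
    rfl
  have hul : 0 < u.length := List.length_pos_of_ne_nil hne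
  have hyval : u.getLast hne = u[u.length - 1]'(by omega) := List.getLast_eq_getElem hne
  have hdval : cs.getLast hcne = cs.getD (u.length - 1) 0 := by
    rw [List.getLast_eq_getElem hcne, getDe cs _ (by omega)]
    congr 1
    omega
  have hbody : Spos (List.zipWith g u.dropLast cs.dropLast) ≤ Spos u.dropLast := by
    apply spos_zip_le
    intro j h1 h2
    have hj : j < u.length - 1 := by simpa [List.length_dropLast] using h1
    rw [List.getElem_dropLast h1, List.getElem_dropLast h2, ← getDe cs j (by omega)]
    exact hpt j (by omega)
  have hl := hlast hul
  have huspos : Spos u = Spos u.dropLast + (u[u.length - 1]'(by omega)).toNat := by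
    conv_lhs => rw [← hsplit_u]
    rw [Spos_append, hyval]
    simp [Spos]
  rw [hzip, Spos_append, hyval, hdval]
  simp only [Spos, List.map_cons, List.sum_cons, List.map_nil, List.sum_nil]
  simp only [Spos] at hbody huspos
  omega

-- ---------- one step / batched steps of A's loop ----------
theorem whileA_clean (M : Int) (f : Nat) (t : List Int) (n : Int) (res : List Int) :
    whileA M (f+1) t n res = whileA M (f+1) (cleanA t) n res := by
  simp only [whileA]
  rw [cleanA_idem]

theorem whileA_step (M : Int) (f : Nat) (u : List Int) (n : Int) (res : List Int)
    (hcu : cleanA u = u) (hne : u ≠ []) :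
    whileA M (f+1) u n res =
      whileA M f (subV u (Cv u M u.length)) (n+1)
        (res ++ patLoopB (Cv u M u.length) [] u.length) := by
  simp only [whileA]
  rw [hcu]
  rw [if_neg (by simpa [List.isEmpty_iff] using hne)]
  rw [passA_eq u.length u le_rfl M res]
  rw [patLoopB_acc]

theorem whileA_batch (M : Int) (u : List Int) (k : Int)
    (hne : u ≠ []) (hnn : ∀ j < u.length, 0 ≤ u.getD j 0)
    (htop : 0 < u.getD (u.length - 1) 0) (hfit : 2 ^ (u.length - 1) ≤ M)
    (_hk1 : 1 ≤ k)
    (hk : ∀ j < u.length, 0 < (Cv u M u.length).getD j 0 →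
      k * (Cv u M u.length).getD j 0 ≤ u.getD j 0) :
    ∀ m : Nat, (m : Int) ≤ k → ∀ f n res,
      whileA M (m + f) u n res =
        whileA M f (List.zipWith (fun x r => x - r * (m : Int)) u (Cv u M u.length))
          (n + (m : Int))
          (res ++ (List.replicate m (patLoopB (Cv u M u.length) [] u.length)).flatten) := by
  have hclen : (Cv u M u.length).length = u.length := Cv_length _ _ _
  have hM0 : 0 ≤ M := le_trans (by positivity) hfit
  have hLpos : 0 < u.length := List.length_pos_of_ne_nil hne
  have hctop : 1 ≤ (Cv u M u.length).getD (u.length - 1) 0 := by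
    have hone : u.length - 1 + 1 = u.length := by omega
    have := Cv_top_pos u M (u.length - 1) htop hfit
    rwa [hone] at this
  intro m
  induction m with
  | zero =>
    intro _ f n res
    have h0 : List.zipWith (fun x r => x - r * ((0:Nat):Int)) u (Cv u M u.length) = u := by
      apply List.ext_getElem
      · simp [hclen]
      · intro j h1 h2
        rw [List.getElem_zipWith]
        simp
    rw [h0]
    simp
  | succ m ih =>
    intro hm f n res
    have hmle : (m:Int) + 1 ≤ k := by push_cast at hm; omega
    have hshift : m + 1 + f = m + (f + 1) := by omega
    rw [hshift, ih (by omega)]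
    have hDlen : (List.zipWith (fun x r => x - r * (m:Int)) u (Cv u M u.length)).length
        = u.length := by
      simp [hclen]
    have hDget : ∀ j, j < u.length →
        (List.zipWith (fun x r => x - r * (m:Int)) u (Cv u M u.length)).getD j 0
          = u.getD j 0 - (Cv u M u.length).getD j 0 * m := by
      intro j hj
      rw [getDe _ j (by omega), List.getElem_zipWith, ← getDe u j (by omega),
        ← getDe (Cv u M u.length) j (by omega)]
    have htopfacts : k * (Cv u M u.length).getD (u.length - 1) 0 ≤ u.getD (u.length - 1) 0 :=
      hk (u.length - 1) (by omega) (by omega)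
    have htop' : 0 < (List.zipWith (fun x r => x - r * (m:Int)) u (Cv u M u.length)).getD
        (u.length - 1) 0 := by
      rw [hDget (u.length - 1) (by omega)]
      have h1 : (m:Int) * (Cv u M u.length).getD (u.length - 1) 0 ≤
          (k - 1) * (Cv u M u.length).getD (u.length - 1) 0 :=
        mul_le_mul_of_nonneg_right (by omega) (by omega)
      have h2 : (k - 1) * (Cv u M u.length).getD (u.length - 1) 0 =
          k * (Cv u M u.length).getD (u.length - 1) 0 -
            (Cv u M u.length).getD (u.length - 1) 0 := by ring
      have h3 : (Cv u M u.length).getD (u.length - 1) 0 * (m:Int) =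
          (m:Int) * (Cv u M u.length).getD (u.length - 1) 0 := mul_comm _ _
      omega
    have hDne : List.zipWith (fun x r => x - r * (m:Int)) u (Cv u M u.length) ≠ [] := by
      intro h
      rw [h] at hDlen
      simp at hDlen
      omega
    have hDclean : cleanA (List.zipWith (fun x r => x - r * (m:Int)) u (Cv u M u.length))
        = List.zipWith (fun x r => x - r * (m:Int)) u (Cv u M u.length) := by
      apply cleanA_of_last_pos _ hDne
      rw [hDlen]
      exact htop'
    rw [whileA_step M f _ _ _ hDclean hDne]
    have hstab : cLoopB (List.zipWith (fun x r => x - r * (m:Int)) u (Cv u M u.length))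
        M [] u.length = cLoopB u M [] u.length := by
      apply stab u _ (m:Int) (by positivity)
      · exact hM0
      · intro j hj
        exact hnn j hj
      · intro j hj hcj
        have h1 := hk j hj hcj
        have h2 : ((m:Int)+1) * (Cv u M u.length).getD j 0 ≤ k * (Cv u M u.length).getD j 0 :=
          mul_le_mul_of_nonneg_right (by omega) (by omega)
        omega
      · intro j hj
        exact hDget j hj
    have hCvD : Cv (List.zipWith (fun x r => x - r * (m:Int)) u (Cv u M u.length)) M
        (List.zipWith (fun x r => x - r * (m:Int)) u (Cv u M u.length)).length
        = Cv u M u.length := by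
      rw [hDlen]
      exact congrArg Prod.fst hstab
    rw [hCvD, hDlen]
    have hsub : subV (List.zipWith (fun x r => x - r * (m:Int)) u (Cv u M u.length))
        (Cv u M u.length)
        = List.zipWith (fun x r => x - r * ((m+1 : Nat):Int)) u (Cv u M u.length) := by
      apply List.ext_getElem
      · simp [length_subV, hclen]
      · intro j h1 h2
        have hjL : j < u.length := by
          simpa [length_subV, hDlen] using h1
        rw [getElem_subV _ _ j (by rw [hDlen]; exact hjL), List.getElem_zipWith,
          List.getElem_zipWith, ← getDe (Cv u M u.length) j (by omega)]
        push_cast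
        ring
    rw [hsub]
    congr 1
    · push_cast
      ring
    · rw [List.replicate_succ']
      simp

-- ---------- B-side step lemmas ----------
theorem spos_any_pos (t : List Int) (h : t.any (fun x => 0 < x) = true) : 1 ≤ Spos t := by
  induction t with
  | nil => simp at h
  | cons a l ih =>
    simp only [List.any_cons, Bool.or_eq_true] at h
    simp only [Spos, List.map_cons, List.sum_cons]
    rcases h with h | h
    · simp at h
      omega
    · have := ih h
      simp only [Spos] at this
      omega

theorem whileB_step_some (M : Int) (g : Nat) (t : List Int) (n : Int) (res : List Int) (k : Int)
    (hany : t.any (fun x => 0 < x) = true)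
    (hkopt : PySem.List.min? ((List.range (stripB t).length).filterMap (fun i =>
        if 0 < (Cv (stripB t) M (stripB t).length).getD i 0 then
          some (PySem.Int.floordiv ((stripB t).getD i 0)
            ((Cv (stripB t) M (stripB t).length).getD i 0))
        else none)) (fun x => x) = some k) :
    whileB M (g+1) t n res =
      whileB M g
        (List.zipWith (fun x r => x - r * k) (stripB t)
          (Cv (stripB t) M (stripB t).length))
        (n + k)
        (res ++ (List.replicate k.toNat
          (patLoopB (Cv (stripB t) M (stripB t).length) [] (stripB t).length)).flatten) := by
  rw [whileB]
  rw [if_pos hany]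
  simp only [show (cLoopB (stripB t) M [] (stripB t).length).1
    = Cv (stripB t) M (stripB t).length from rfl]
  simp only [hkopt]

theorem whileB_halt (M : Int) (g : Nat) (t : List Int) (n : Int) (res : List Int)
    (hany : t.any (fun x => 0 < x) = false) :
    whileB M (g+1) t n res = (n, res) := by
  rw [whileB]
  rw [if_neg (by simp [hany])]

theorem whileA_halt (M : Int) (f : Nat) (t : List Int) (n : Int) (res : List Int)
    (hcl : cleanA t = []) :
    whileA M (f+1) t n res = (n, res) := by
  rw [whileA]
  simp [hcl]

-- ---------- main equivalence ----------
theorem main_eq (M : Int) :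
    ∀ s t (n : Int) (res : List Int) f g, Pre_min_tiles_gr t M → Spos t ≤ s →
      Spos t < f → Spos t < g → whileA M f t n res = whileB M g t n res := by
  intro s
  induction s with
  | zero =>
    intro t n res f g hpre hs hf hg
    obtain ⟨f', rfl⟩ : ∃ f', f = f' + 1 := ⟨f - 1, by omega⟩
    obtain ⟨g', rfl⟩ : ∃ g', g = g' + 1 := ⟨g - 1, by omega⟩
    have hany : t.any (fun x => 0 < x) = false := by
      by_contra hc
      have := spos_any_pos t (by
        cases h : t.any (fun x => 0 < x)
        · exact absurd h hc
        · rfl)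
      omega
    rw [whileB_halt M g' t n res hany, whileA_halt M f' t n res ((cleanA_nil_iff t).mpr hany)]
  | succ s ih =>
    intro t n res f g hpre hs hf hg
    obtain ⟨f', rfl⟩ : ∃ f', f = f' + 1 := ⟨f - 1, by omega⟩
    obtain ⟨g', rfl⟩ : ∃ g', g = g' + 1 := ⟨g - 1, by omega⟩
    by_cases hany : t.any (fun x => 0 < x) = true
    case neg =>
      have hany' : t.any (fun x => 0 < x) = false := by
        cases h : t.any (fun x => 0 < x)
        · rfl
        · exact absurd h hany
      rw [whileB_halt M g' t n res hany', whileA_halt M f' t n res ((cleanA_nil_iff t).mpr hany')]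
    case pos =>
      obtain ⟨hnnpre, hfitpre⟩ := hpre
      have hue : stripB t = cleanA t := stripB_eq_cleanA t
      have hune : stripB t ≠ [] := by
        rw [hue]
        intro h
        rw [cleanA_nil_iff] at h
        rw [h] at hany
        simp at hany
      have hgetu : ∀ j < (stripB t).length, (stripB t).getD j 0 = t.getD j 0 := by
        intro j hj
        rw [hue] at hj ⊢
        exact cleanA_getD t j hj
      have hLle : (stripB t).length ≤ t.length := by rw [hue]; exact cleanA_length_le t
      have hLpos : 0 < (stripB t).length := List.length_pos_of_ne_nil hune
      have htopu : 0 < (stripB t).getD ((stripB t).length - 1) 0 := by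
        rw [hue]
        exact cleanA_last_pos t (by rw [← hue]; exact hune)
      have hnnu : ∀ j < (stripB t).length, 0 ≤ (stripB t).getD j 0 := by
        intro j hj
        rw [hgetu j hj]
        exact hnnpre j (by omega)
      have hpreu : ∀ j < (stripB t).length, 0 < (stripB t).getD j 0 → 2 ^ j ≤ M := by
        intro j hj hp
        exact hfitpre j (by omega) (by rw [← hgetu j hj]; exact hp)
      have hfit : (2:Int) ^ ((stripB t).length - 1) ≤ M := hpreu _ (by omega) htopu
      have hM0 : (0:Int) ≤ M := le_trans (by positivity) hfit
      have hcleanu : cleanA (stripB t) = stripB t := by rw [hue]; exact cleanA_idem t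
      have hSu : Spos (stripB t) = Spos t := by rw [hue]; exact Spos_cleanA t
      have hclen : (Cv (stripB t) M (stripB t).length).length = (stripB t).length :=
        Cv_length _ _ _
      have hctop : 1 ≤ (Cv (stripB t) M (stripB t).length).getD ((stripB t).length - 1) 0 := by
        have hone : (stripB t).length - 1 + 1 = (stripB t).length := by omega
        have := Cv_top_pos (stripB t) M ((stripB t).length - 1) htopu hfit
        rwa [hone] at this
      have hcle : ∀ j < (stripB t).length,
          (Cv (stripB t) M (stripB t).length).getD j 0 ≤ (stripB t).getD j 0 := by
        intro j hj
        exact Cv_le (stripB t) _ M j hj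
      have hcnn : ∀ j < (stripB t).length,
          0 ≤ (Cv (stripB t) M (stripB t).length).getD j 0 := by
        intro j hj
        exact Cv_nonneg (stripB t) (stripB t).length M hM0 j hj (hnnu j hj)
      have hmemtop : PySem.Int.floordiv ((stripB t).getD ((stripB t).length - 1) 0)
          ((Cv (stripB t) M (stripB t).length).getD ((stripB t).length - 1) 0) ∈
          (List.range (stripB t).length).filterMap (fun i =>
            if 0 < (Cv (stripB t) M (stripB t).length).getD i 0 then
              some (PySem.Int.floordiv ((stripB t).getD i 0)
                ((Cv (stripB t) M (stripB t).length).getD i 0))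
            else none) := by
        rw [List.mem_filterMap]
        exact ⟨(stripB t).length - 1, by simp; omega, by rw [if_pos (by omega)]⟩
      obtain ⟨k, hkopt⟩ : ∃ k, PySem.List.min? ((List.range (stripB t).length).filterMap
          (fun i => if 0 < (Cv (stripB t) M (stripB t).length).getD i 0 then
            some (PySem.Int.floordiv ((stripB t).getD i 0)
              ((Cv (stripB t) M (stripB t).length).getD i 0))
          else none)) (fun x => x) = some k := by
        cases h : PySem.List.min? ((List.range (stripB t).length).filterMap
            (fun i => if 0 < (Cv (stripB t) M (stripB t).length).getD i 0 then
              some (PySem.Int.floordiv ((stripB t).getD i 0)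
                ((Cv (stripB t) M (stripB t).length).getD i 0))
            else none)) (fun x => x) with
        | none =>
          rw [PySem.List.min?_eq_none_iff] at h
          rw [h] at hmemtop
          simp at hmemtop
        | some k => exact ⟨k, rfl⟩
      have hkmem := PySem.List.min?_mem hkopt
      obtain ⟨j0, hj0r, hj0⟩ := List.mem_filterMap.mp hkmem
      have hj0L : j0 < (stripB t).length := by simpa using hj0r
      have hj0pos : 0 < (Cv (stripB t) M (stripB t).length).getD j0 0 := by
        by_contra hc
        rw [if_neg hc] at hj0
        simp at hj0
      have hkval : k = PySem.Int.floordiv ((stripB t).getD j0 0)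
          ((Cv (stripB t) M (stripB t).length).getD j0 0) := by
        rw [if_pos hj0pos] at hj0
        exact (Option.some.injEq _ _ ▸ hj0).symm
      have hk1 : 1 ≤ k := by
        rw [hkval, PySem.Int.le_floordiv_iff_mul_le hj0pos]
        have := hcle j0 hj0L
        omega
      have hkub : ∀ j < (stripB t).length,
          0 < (Cv (stripB t) M (stripB t).length).getD j 0 →
          k * (Cv (stripB t) M (stripB t).length).getD j 0 ≤ (stripB t).getD j 0 := by
        intro j hj hcj
        have hmem : PySem.Int.floordiv ((stripB t).getD j 0)
            ((Cv (stripB t) M (stripB t).length).getD j 0) ∈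
            (List.range (stripB t).length).filterMap (fun i =>
              if 0 < (Cv (stripB t) M (stripB t).length).getD i 0 then
                some (PySem.Int.floordiv ((stripB t).getD i 0)
                  ((Cv (stripB t) M (stripB t).length).getD i 0))
              else none) := by
          rw [List.mem_filterMap]
          exact ⟨j, by simpa using hj, by rw [if_pos hcj]⟩
        have := PySem.List.min?_isMin hkopt _ hmem
        rwa [PySem.Int.le_floordiv_iff_mul_le hcj] at this
      -- Spos decrease by at least k
      have hsb : Spos (List.zipWith (fun x r => x - r * k) (stripB t)
          (Cv (stripB t) M (stripB t).length)) + k.toNat ≤ Spos (stripB t) := by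
        apply spos_batch _ _ _ _ (by rw [hclen]) hune
        · intro j hj
          have h1 := hnnu j hj
          have h2 := hcnn j hj
          have h3 : 0 ≤ (Cv (stripB t) M (stripB t).length).getD j 0 * k :=
            mul_nonneg h2 (by omega)
          rw [← getDe _ j hj]
          omega
        · intro _
          have h1 := hkub ((stripB t).length - 1) (by omega) (by omega)
          have h2 : k * 1 ≤ k * (Cv (stripB t) M (stripB t).length).getD
              ((stripB t).length - 1) 0 := mul_le_mul_of_nonneg_left hctop (by omega)
          have h3 : (Cv (stripB t) M (stripB t).length).getD ((stripB t).length - 1) 0 * k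
              = k * (Cv (stripB t) M (stripB t).length).getD ((stripB t).length - 1) 0 :=
            mul_comm _ _
          rw [← getDe _ _ (by omega : (stripB t).length - 1 < (stripB t).length)]
          omega
      have hkfuel : k.toNat ≤ Spos t := by omega
      -- A side: clean, then k batched passes
      have hA : whileA M (f' + 1) t n res = whileA M (f' + 1) (stripB t) n res := by
        rw [whileA_clean, ← hue]
      rw [hA]
      have hsplit : f' + 1 = k.toNat + (f' + 1 - k.toNat) := by omega
      rw [hsplit]
      have hcast : ((k.toNat : Nat) : Int) = k := Int.toNat_of_nonneg (by omega)
      rw [whileA_batch M (stripB t) k hune hnnu htopu hfit hk1 hkub k.toNat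
        (by rw [hcast]) (f' + 1 - k.toNat) n res]
      -- B side: one batched phase
      rw [whileB_step_some M g' t n res k hany hkopt]
      rw [hcast]
      -- new state: value and remaining facts
      have hDget : ∀ j, j < (stripB t).length →
          (List.zipWith (fun x r => x - r * k) (stripB t)
            (Cv (stripB t) M (stripB t).length)).getD j 0
          = (stripB t).getD j 0 - (Cv (stripB t) M (stripB t).length).getD j 0 * k := by
        intro j hj
        rw [getDe _ j (by simpa [hclen] using hj), List.getElem_zipWith,
          ← getDe (stripB t) j hj, ← getDe (Cv (stripB t) M (stripB t).length) j (by omega)]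
      -- recurse
      apply ih
      · constructor
        · -- nonnegativity preserved
          intro j hj
          have hjL : j < (stripB t).length := by simpa [hclen] using hj
          rw [hDget j hjL]
          by_cases hcj : 0 < (Cv (stripB t) M (stripB t).length).getD j 0
          · have h1 := hkub j hjL hcj
            have h2 : (Cv (stripB t) M (stripB t).length).getD j 0 * k
                = k * (Cv (stripB t) M (stripB t).length).getD j 0 := mul_comm _ _
            omega
          · have h0 : (Cv (stripB t) M (stripB t).length).getD j 0 = 0 := by
              have := hcnn j hjL
              omega
            rw [h0]
            have := hnnu j hjL
            omega
        · -- fitting preserved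
          intro j hj hp
          have hjL : j < (stripB t).length := by simpa [hclen] using hj
          rw [hDget j hjL] at hp
          have h3 : 0 ≤ (Cv (stripB t) M (stripB t).length).getD j 0 * k :=
            mul_nonneg (hcnn j hjL) (by omega)
          exact hpreu j hjL (by omega)
      · omega
      · omega
      · omega


-- ===== VERDICT (by name: the statement is the Claim_ definition above) =====
theorem min_tiles_gr_spec : Claim_equal_min_tiles_gr := by
  intro t M _ hpre
  unfold Spec_min_tiles_gr min_tiles_gr min_tiles_gr_alt
  rw [fuelA_eq, fuelB_eq]
  exact main_eq M (Spos t) t 0 [] _ _ hpre le_rfl (by omega) (by omega)
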